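-- pv_equiv track=rewrite | github.com/gemechisworku/conversion-engine | agent/services/enrichment/ai_maturity_inputs.py | _modern_stack_hits
-- ===== SOURCE A (Python) =====
-- def _modern_stack_hits(technologies: list[str]) -> list[str]:
--     markers = (
--         "databricks",
--         "snowflake",
--         "dbt",
--         "airflow",
--         "kafka",
--         "pytorch",
--         "tensorflow",
--         "openai",
--         "vertex ai",
--         "sagemaker",
--         "hugging face",
--     )
--     hits: list[str] = []
--     for item in technologies:
--         lower = item.lower()
--         if any(marker in lower for marker in markers):
--             hits.append(item)
--     return hits
-- ===== SOURCE B (Python) =====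
-- _MARKERS = (
--     "databricks",
--     "snowflake",
--     "dbt",
--     "airflow",
--     "kafka",
--     "pytorch",
--     "tensorflow",
--     "openai",
--     "vertex ai",
--     "sagemaker",
--     "hugging face",
-- )
--
--
-- def _modern_stack_hits(technologies: list[str]) -> list[str]:
--     # Marker-major staged computation: for each marker, OR its matches into a
--     # boolean keep-mask over all items, then select the kept items in one pass.
--     lowered = [item.lower() for item in technologies]
--     keep = [False] * len(technologies)
--     for marker in _MARKERS:
--         keep = [k or marker in low for k, low in zip(keep, lowered)]
--     return [item for item, k in zip(technologies, keep) if k]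
-- ===== Notes on version B (the rewrite author's own statement) =====
-- stated objective: alternative
-- what changed: B inverts the loop nesting: instead of A's item-major single pass that lowercases each item and scans the markers with any() inside an accumulator loop, B runs marker-major staged passes that OR each marker's matches into a boolean keep-mask over all items, then selects the kept items with one zip-filter pass.
import Mathlib
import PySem

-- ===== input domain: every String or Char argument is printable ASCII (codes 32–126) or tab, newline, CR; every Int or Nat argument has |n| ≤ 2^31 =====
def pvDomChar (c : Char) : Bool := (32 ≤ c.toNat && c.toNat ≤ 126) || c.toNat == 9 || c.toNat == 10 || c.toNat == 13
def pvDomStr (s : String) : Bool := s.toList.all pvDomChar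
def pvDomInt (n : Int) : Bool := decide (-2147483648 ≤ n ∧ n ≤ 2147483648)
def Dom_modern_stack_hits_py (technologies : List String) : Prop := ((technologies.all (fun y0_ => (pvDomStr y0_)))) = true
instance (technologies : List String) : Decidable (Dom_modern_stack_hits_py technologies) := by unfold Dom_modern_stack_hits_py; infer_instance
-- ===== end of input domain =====

-- B inverts the loop nesting: instead of A's item-major accumulator loop with any() over markers,
-- B runs marker-major staged passes OR-ing each marker's matches into a boolean keep-mask, then
-- selects kept items in one zip-filter pass (alternative decomposition, same cost).

-- ===== PORT A =====
def pvMarkers : List String :=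
  ["databricks", "snowflake", "dbt", "airflow", "kafka", "pytorch",
   "tensorflow", "openai", "vertex ai", "sagemaker", "hugging face"]

def modern_stack_hits_py (technologies : List String) : List String :=
  technologies.foldl
    (fun hits item =>
      let lower := PySem.Str.lower item
      if pvMarkers.any (fun marker => PySem.Str.isIn marker lower) then hits ++ [item] else hits)
    []

-- ===== PORT B =====
def modern_stack_hits_py_alt (technologies : List String) : List String :=
  let lowered := technologies.map PySem.Str.lower
  let keep := pvMarkers.foldl
    (fun keep marker =>
      List.zipWith (fun k low => k || PySem.Str.isIn marker low) keep lowered)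
    (List.replicate technologies.length false)
  ((technologies.zip keep).filter (fun p => p.2)).map Prod.fst

-- ===== PRECONDITION & SPEC =====
def Spec_modern_stack_hits_py (technologies : List String) (out : List String) : Prop := out = modern_stack_hits_py_alt technologies
instance (technologies : List String) (out : List String) : Decidable (Spec_modern_stack_hits_py technologies out) := by unfold Spec_modern_stack_hits_py; infer_instance

-- ===== CLAIM (what is proved, stated in full; the proofs are below) =====
def Claim_equal_modern_stack_hits_py : Prop := ∀ (technologies : List String), Dom_modern_stack_hits_py technologies → Spec_modern_stack_hits_py technologies (modern_stack_hits_py technologies)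

-- ===== LEMMAS AND PROOFS =====

-- zipWith over the same second list fuses.
theorem zipWith_zipWith_same {α β γ δ : Type} (f : γ → β → δ) (g : α → β → γ)
    (a : List α) (b : List β) :
    List.zipWith f (List.zipWith g a b) b = List.zipWith (fun x y => f (g x y) y) a b := by
  induction a generalizing b with
  | nil => simp
  | cons x xs ih =>
    cases b with
    | nil => simp
    | cons y ys => simp [ih]

-- discarding the second argument: zipWith projects to the first list (equal lengths).
theorem zipWith_fst_of_length_eq {α β : Type} (a : List α) (b : List β)
    (h : a.length = b.length) :
    List.zipWith (fun x (_ : β) => x) a b = a := by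
  induction a generalizing b with
  | nil => simp
  | cons x xs ih =>
    cases b with
    | nil => simp at h
    | cons y ys =>
      simp only [List.zipWith_cons_cons, List.cons.injEq, true_and]
      exact ih ys (by simpa using h)

-- the marker-major mask fold, characterised: the final mask is the pointwise OR over all markers.
theorem mask_foldl (ms : List String) (lowered : List String) :
    ∀ acc : List Bool, acc.length = lowered.length →
      ms.foldl
        (fun keep marker =>
          List.zipWith (fun k low => k || PySem.Str.isIn marker low) keep lowered) acc
      = List.zipWith (fun k low => k || ms.any (fun m => PySem.Str.isIn m low)) acc lowered := by
  induction ms with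
  | nil =>
    intro acc h
    simpa using (zipWith_fst_of_length_eq acc lowered h).symm
  | cons m ms ih =>
    intro acc h
    simp only [List.foldl_cons]
    rw [ih _ (by simp [h]), zipWith_zipWith_same]
    simp [Bool.or_assoc]

-- OR-ing into an all-false mask is just map.
theorem zipWith_replicate_false {β : Type} (p : β → Bool) (b : List β) :
    List.zipWith (fun k low => k || p low) (List.replicate b.length false) b = b.map p := by
  induction b with
  | nil => simp
  | cons y ys ih => simp [List.replicate_succ, ih]

-- the final selection pass on a mask computed by map is a filter.
theorem zip_map_filter {α : Type} (f : α → Bool) (xs : List α) :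
    ((xs.zip (xs.map f)).filter (fun p => p.2)).map Prod.fst = xs.filter f := by
  induction xs with
  | nil => simp
  | cons x xs ih =>
    simp only [List.map_cons, List.zip_cons_cons, List.filter_cons]
    cases hfx : f x <;> simp [ih]

-- ===== VERDICT (by name: the statement is the Claim_ definition above) =====
theorem modern_stack_hits_py_spec : Claim_equal_modern_stack_hits_py := by
  intro technologies _
  unfold Spec_modern_stack_hits_py modern_stack_hits_py modern_stack_hits_py_alt
  rw [PySem.List.foldl_append_if_eq_filter]
  simp only [List.nil_append]
  rw [mask_foldl _ _ _ (by simp), show technologies.length = (technologies.map PySem.Str.lower).length by simp,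
      zipWith_replicate_false, List.map_map]
  exact (zip_map_filter _ technologies).symm
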